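-- pv_equiv track=rewrite | github.com/jacobjma/point-segment-matching | psm/graph/faces.py | face_adjacency
-- ===== SOURCE A (Python) =====
-- def face_adjacency(faces):
--     """ Returns the adjacency of a set of faces.
--     Two faces are considered adjacent if they share one or more edges.
--     """
--
--     faces = [set([frozenset((face[i - 1], face[i])) for i in range(len(face))]) for face in faces]
--
--     adjacency = [set() for i in range(len(faces))]
--     for i, face in enumerate(faces):
--
--         for j, other_face in enumerate(faces[:i]):
--
--             if len(set(face).intersection(other_face)) > 0:
--                 adjacency[i].add(j)
--                 adjacency[j].add(i)
--
--     return adjacency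
-- ===== SOURCE B (Python) =====
-- def face_adjacency(faces):
--     """ Returns the adjacency of a set of faces.
--     Two faces are considered adjacent if they share one or more edges.
--     Single pass building an edge -> faces map; each face is linked only to the
--     faces it actually shares an edge with, instead of being tested against all
--     earlier faces.  An edge is keyed by its normalised endpoint pair.
--     """
--
--     adjacency = [set() for _ in faces]
--     owners = {}  # edge -> ascending list of indices of the faces containing it
--     for k, face in enumerate(faces):
--         edges = set()
--         for i in range(len(face)):
--             a, b = face[i - 1], face[i]
--             edges.add((a, b) if a <= b else (b, a))
--         nbrs = set()
--         for e in edges: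
--             cur = owners.get(e, [])
--             nbrs.update(cur)
--             owners[e] = cur + [k]
--         for j in sorted(nbrs):
--             adjacency[k].add(j)
--             adjacency[j].add(k)
--     return adjacency
-- ===== Notes on version B (the rewrite author's own statement) =====
-- stated objective: faster
-- what changed: Replaces the all-pairs O(F^2) face-by-face intersection test with a single pass that builds an edge->faces hash map and links each face only to the earlier faces sharing one of its edges.
import Mathlib
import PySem

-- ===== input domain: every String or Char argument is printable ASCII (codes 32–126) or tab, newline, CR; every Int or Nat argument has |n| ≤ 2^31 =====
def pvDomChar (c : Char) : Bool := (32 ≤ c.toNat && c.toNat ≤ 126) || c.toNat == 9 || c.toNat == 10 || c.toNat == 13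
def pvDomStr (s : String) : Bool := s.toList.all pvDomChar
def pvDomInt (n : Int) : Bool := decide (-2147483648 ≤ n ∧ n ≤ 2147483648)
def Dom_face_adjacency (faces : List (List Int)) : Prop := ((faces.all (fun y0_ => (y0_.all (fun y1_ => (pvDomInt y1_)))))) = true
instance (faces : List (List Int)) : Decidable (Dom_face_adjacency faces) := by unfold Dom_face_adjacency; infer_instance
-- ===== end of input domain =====

-- B replaces A's all-pairs face-intersection scan by a one-pass edge -> faces map
-- that links each face only to the faces actually sharing one of its edges (faster).


-- ===== PORT A =====
-- frozenset((face[i-1], face[i])) is modelled exactly as the ordered pair (min, max):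
-- two int frozensets of size ≤ 2 are equal iff these normalised pairs are equal.
def pvNorm (a b : Int) : Int × Int := if a ≤ b then (a, b) else (b, a)

-- A's set(frozenset((face[i-1], face[i])) for i in range(len(face))); B builds the same
-- set of normalised pairs by an explicit loop (see pvEdgesB_eq below)
def pvEdges (face : List Int) : PySem.Set (Int × Int) :=
  PySem.Set.ofList ((List.range face.length).map (fun i =>
    pvNorm (PySem.List.pyGetD face ((i : Int) - 1) 0) (PySem.List.pyGetD face (i : Int) 0)))

-- adjacency[i].add(j); adjacency[j].add(i)  (both Pythons do these two adds, outer index first)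
def pvLink (adj : List (PySem.Set Int)) (i j : Int) : List (PySem.Set Int) :=
  let adj := PySem.List.pySetD adj i (PySem.Set.add (PySem.List.pyGetD adj i []) j)
  PySem.List.pySetD adj j (PySem.Set.add (PySem.List.pyGetD adj j []) i)

def face_adjacency (faces : List (List Int)) : List (List Int) :=
  let fs := faces.map pvEdges
  let adjacency : List (PySem.Set Int) := fs.map (fun _ => PySem.Set.empty)
  (PySem.List.enumerate fs 0).foldl (fun adj p =>
    (PySem.List.enumerate (PySem.List.slice fs none (some p.1)) 0).foldl (fun adj q =>
      if 0 < PySem.Set.len (PySem.Set.inter (PySem.Set.ofList p.2) q.2)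
      then pvLink adj p.1 q.1 else adj) adj) adjacency

-- ===== PORT B =====
def face_adjacency_alt (faces : List (List Int)) : List (List Int) :=
  let adjacency : List (PySem.Set Int) := faces.map (fun _ => PySem.Set.empty)
  let r := (PySem.List.enumerate faces 0).foldl
    (fun (st : List (PySem.Set Int) × PySem.Dict (Int × Int) (List Int)) p =>
      let edges := (List.range p.2.length).foldl
        (fun (s : PySem.Set (Int × Int)) i =>
          PySem.Set.add s
            (pvNorm (PySem.List.pyGetD p.2 ((i : Int) - 1) 0) (PySem.List.pyGetD p.2 (i : Int) 0)))
        PySem.Set.empty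
      let r := edges.foldl
        (fun (s : PySem.Set Int × PySem.Dict (Int × Int) (List Int)) e =>
          let cur := s.2.getD e []
          (PySem.Set.update s.1 cur, s.2.insert e (cur ++ [p.1])))
        (PySem.Set.empty, st.2)
      ((PySem.List.sorted r.1 (fun x => x)).foldl (fun adj j => pvLink adj p.1 j) st.1, r.2))
    (adjacency, PySem.Dict.empty)
  r.1

-- ===== PRECONDITION & SPEC =====
def Spec_face_adjacency (faces : List (List Int)) (out : List (List Int)) : Prop := out = face_adjacency_alt faces
instance (faces : List (List Int)) (out : List (List Int)) : Decidable (Spec_face_adjacency faces out) := by unfold Spec_face_adjacency; infer_instance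

-- ===== CLAIM (what is proved, stated in full; the proofs are below) =====
def Claim_equal_face_adjacency : Prop := ∀ (faces : List (List Int)), Dom_face_adjacency faces → Spec_face_adjacency faces (face_adjacency faces)

-- ===== LEMMAS AND PROOFS =====

-- the edge set of face number j (out of range: the empty set)
def pvE (faces : List (List Int)) (j : Int) : PySem.Set (Int × Int) :=
  pvEdges (PySem.List.pyGetD faces j [])

-- "face k and face j share an edge", exactly A's test
def pvShare (faces : List (List Int)) (k j : Int) : Bool :=
  decide (0 < PySem.Set.len (PySem.Set.inter (PySem.Set.ofList (pvE faces k)) (pvE faces j)))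

-- the ascending list of earlier faces adjacent to face k
def pvL (faces : List (List Int)) (k : Int) : List Int :=
  (PySem.List.pyRange 0 k).filter (fun j => pvShare faces k j)

-- the common per-face update both programs perform on the adjacency state
def pvStep (faces : List (List Int)) (adj : List (PySem.Set Int)) (k : Int) : List (PySem.Set Int) :=
  (pvL faces k).foldl (fun adj j => pvLink adj k j) adj

-- B's per-face update on its (adjacency, owners) state, in canonical index form
def pvStepB (faces : List (List Int))
    (st : List (PySem.Set Int) × PySem.Dict (Int × Int) (List Int)) (k : Int) :
    List (PySem.Set Int) × PySem.Dict (Int × Int) (List Int) :=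
  let r := (pvE faces k).foldl
    (fun (s : PySem.Set Int × PySem.Dict (Int × Int) (List Int)) e =>
      let cur := s.2.getD e []
      (PySem.Set.update s.1 cur, s.2.insert e (cur ++ [k])))
    (PySem.Set.empty, st.2)
  ((PySem.List.sorted r.1 (fun x => x)).foldl (fun adj j => pvLink adj k j) st.1, r.2)

-- invariant: the owners map sends each edge to the ascending list of faces < k containing it
def pvOwInv (faces : List (List Int)) (ow : PySem.Dict (Int × Int) (List Int)) (k : Int) : Prop :=
  ∀ e, ow.getD e [] = (PySem.List.pyRange 0 k).filter (fun j => PySem.Set.contains (pvE faces j) e)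

theorem pvE_nodup (faces : List (List Int)) (j : Int) : (pvE faces j).Nodup := by
  unfold pvE pvEdges; exact PySem.Set.nodup_ofList _

theorem pvEdgesB_eq (face : List Int) :
    (List.range face.length).foldl
      (fun (s : PySem.Set (Int × Int)) i =>
        PySem.Set.add s
          (pvNorm (PySem.List.pyGetD face ((i : Int) - 1) 0) (PySem.List.pyGetD face (i : Int) 0)))
      PySem.Set.empty = pvEdges face := by
  unfold pvEdges
  rw [PySem.Set.ofList_eq_foldl, List.foldl_map]
  rfl

theorem pvB_canon (faces : List (List Int)) :
    face_adjacency_alt faces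
      = ((PySem.List.pyRange 0 (faces.length : Int)).foldl (pvStepB faces)
          (faces.map (fun _ => PySem.Set.empty), PySem.Dict.empty)).1 := by
  unfold face_adjacency_alt
  rw [PySem.List.enumerate_eq_map_pyRange faces []]
  simp only [List.foldl_map, PySem.List.len_eq]
  rw [PySem.List.foldl_congr_mem _ _ (pvStepB faces) _ ?_]
  · intro st j hj
    show _ = pvStepB faces st j
    rw [pvEdgesB_eq]
    rfl

theorem pvInnerA (faces : List (List Int)) (adj : List (PySem.Set Int)) (k : Int)
    (hk0 : 0 ≤ k) (hkn : k < (faces.length : Int)) :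
    (PySem.List.enumerate (PySem.List.slice (faces.map pvEdges) none (some k))).foldl
      (fun adj q =>
        if 0 < PySem.Set.len (PySem.Set.inter (PySem.Set.ofList (pvE faces k)) q.2)
        then pvLink adj k q.1 else adj) adj
      = pvStep faces adj k := by
  rw [PySem.List.slice_to _ hk0,
    PySem.List.enumerate_eq_map_pyRange ((faces.map pvEdges).take k.toNat) (pvEdges [])]
  simp only [List.foldl_map, PySem.List.len_eq, List.length_take, List.length_map]
  have hmin : ((min k.toNat faces.length : Nat) : Int) = k := by omega
  rw [hmin]
  rw [PySem.List.foldl_congr_mem _ _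
    (fun adj j => if pvShare faces k j = true then pvLink adj k j else adj) adj ?_]
  · unfold pvStep pvL
    rw [List.foldl_filter]
  · intro acc j hj
    obtain ⟨hj0, hjk⟩ := PySem.List.mem_pyRange_one.mp hj
    have hjn : j < (faces.length : Int) := lt_trans hjk hkn
    have h1 : PySem.List.pyGetD ((faces.map pvEdges).take k.toNat) j (pvEdges [])
        = pvE faces j := by
      rw [PySem.List.pyGetD_eq_getElem _ _ hj0 (by simp; omega)]
      rw [List.getElem_take, List.getElem_map]
      unfold pvE
      rw [PySem.List.pyGetD_eq_getElem _ _ hj0 (by omega)]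
    rw [h1]
    simp only [pvShare, decide_eq_true_eq]

theorem pvA_canon (faces : List (List Int)) :
    face_adjacency faces
      = (PySem.List.pyRange 0 (faces.length : Int)).foldl (pvStep faces)
          (faces.map (fun _ => PySem.Set.empty)) := by
  show (PySem.List.enumerate (faces.map pvEdges)).foldl
      (fun adj p =>
        (PySem.List.enumerate (PySem.List.slice (faces.map pvEdges) none (some p.1))).foldl
          (fun adj q =>
            if 0 < PySem.Set.len (PySem.Set.inter (PySem.Set.ofList p.2) q.2)
            then pvLink adj p.1 q.1 else adj) adj)
      ((faces.map pvEdges).map (fun _ => PySem.Set.empty)) = _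
  rw [PySem.List.enumerate_eq_map_pyRange (faces.map pvEdges) (pvEdges [])]
  simp only [List.foldl_map, PySem.List.len_eq, List.length_map, List.map_map]
  rw [PySem.List.foldl_congr_mem _ _ (pvStep faces) _ ?_]
  · rfl
  · intro acc k hk
    obtain ⟨hk0, hkn⟩ := PySem.List.mem_pyRange_one.mp hk
    have h1 : PySem.List.pyGetD (faces.map pvEdges) k (pvEdges []) = pvE faces k :=
      PySem.List.pyGetD_map pvEdges faces k []
    rw [h1, pvInnerA faces acc k hk0 hkn]

theorem pvEdgeFold (k : Int) (es : List (Int × Int)) (hnd : es.Nodup)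
    (ow : PySem.Dict (Int × Int) (List Int)) :
    ∀ (d : PySem.Dict (Int × Int) (List Int)) (nb : PySem.Set Int),
    (∀ e ∈ es, d.getD e [] = ow.getD e []) →
    (es.foldl (fun (s : PySem.Set Int × PySem.Dict (Int × Int) (List Int)) e =>
        let cur := s.2.getD e []
        (PySem.Set.update s.1 cur, s.2.insert e (cur ++ [k]))) (nb, d)).1
      = es.foldl (fun s e => PySem.Set.update s (ow.getD e [])) nb
    ∧ ∀ e', (es.foldl (fun (s : PySem.Set Int × PySem.Dict (Int × Int) (List Int)) e =>
        let cur := s.2.getD e []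
        (PySem.Set.update s.1 cur, s.2.insert e (cur ++ [k]))) (nb, d)).2.getD e' []
      = if e' ∈ es then ow.getD e' [] ++ [k] else d.getD e' [] := by
  induction es with
  | nil => intro d nb h; simp
  | cons e es ih =>
      intro d nb h
      obtain ⟨hne, hnd'⟩ := List.nodup_cons.mp hnd
      have he : d.getD e [] = ow.getD e [] := h e (List.mem_cons_self ..)
      have hpre : ∀ e'' ∈ es, (d.insert e (d.getD e [] ++ [k])).getD e'' [] = ow.getD e'' [] := by
        intro e'' h''
        rw [PySem.Dict.getD_insert]
        have : e'' ≠ e := fun hEq => hne (hEq ▸ h'')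
        rw [if_neg this]
        exact h e'' (List.mem_cons_of_mem _ h'')
      obtain ⟨ih1, ih2⟩ := ih hnd' (d.insert e (d.getD e [] ++ [k]))
        (PySem.Set.update nb (d.getD e [])) hpre
      refine ⟨?_, ?_⟩
      · simpa [he] using ih1
      · intro e'
        rw [List.foldl_cons]
        show (es.foldl _ (PySem.Set.update nb (d.getD e []), d.insert e (d.getD e [] ++ [k]))).2.getD e' [] = _
        rw [ih2 e']
        by_cases h1 : e' ∈ es
        · rw [if_pos h1, if_pos (List.mem_cons_of_mem _ h1)]
        · rw [if_neg h1, PySem.Dict.getD_insert]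
          by_cases h2 : e' = e
          · rw [if_pos h2, if_pos (by simp [h2]), h2, he]
          · rw [if_neg h2, if_neg (by simp [h1, h2])]

theorem pvMemFoldUpdate (es : List (Int × Int)) (g : Int × Int → List Int) :
    ∀ (nb : PySem.Set Int) (y : Int),
      y ∈ es.foldl (fun s e => PySem.Set.update s (g e)) nb ↔ y ∈ nb ∨ ∃ e ∈ es, y ∈ g e := by
  induction es with
  | nil => simp
  | cons e es ih =>
      intro nb y
      rw [List.foldl_cons, ih]
      rw [PySem.Set.mem_update]
      constructor
      · rintro (⟨h | h⟩ | ⟨e', he', hy⟩)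
        · exact Or.inl h
        · exact Or.inr ⟨e, List.mem_cons_self .., h⟩
        · exact Or.inr ⟨e', List.mem_cons_of_mem _ he', hy⟩
      · rintro (h | ⟨e', he', hy⟩)
        · exact Or.inl (Or.inl h)
        · rcases List.mem_cons.mp he' with h1 | h1
          · exact Or.inl (Or.inr (h1 ▸ hy))
          · exact Or.inr ⟨e', h1, hy⟩

theorem pvNodupFoldUpdate (es : List (Int × Int)) (g : Int × Int → List Int) :
    ∀ (nb : PySem.Set Int), nb.Nodup →
      (es.foldl (fun s e => PySem.Set.update s (g e)) nb).Nodup := by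
  induction es with
  | nil => intro nb h; simpa
  | cons e es ih => intro nb h; exact ih _ (PySem.Set.nodup_update _ _ h)

theorem pvInterPos (s t : PySem.Set (Int × Int)) :
    0 < PySem.Set.len (PySem.Set.inter s t) ↔ ∃ e ∈ s, e ∈ t := by
  simp only [PySem.Set.len, PySem.Set.inter, Int.natCast_pos, List.length_pos_iff_exists_mem,
    List.mem_filter, PySem.Set.contains_iff]

theorem pvSortedNbrs (faces : List (List Int)) (ow : PySem.Dict (Int × Int) (List Int))
    (k : Int) (h : pvOwInv faces ow k) :
    PySem.List.sorted
      ((pvE faces k).foldl (fun s e => PySem.Set.update s (ow.getD e [])) PySem.Set.empty)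
      (fun x => x) = pvL faces k := by
  apply PySem.List.sorted_eq_of_perm_of_pairwise_lt
  · unfold pvL
    rw [List.perm_ext_iff_of_nodup
      (List.Nodup.filter _ (PySem.List.nodup_pyRange_one 0 k))
      (pvNodupFoldUpdate _ _ PySem.Set.empty List.nodup_nil)]
    intro y
    rw [pvMemFoldUpdate]
    simp only [List.mem_filter, PySem.List.mem_pyRange_one, pvShare, decide_eq_true_eq,
      pvInterPos, PySem.Set.ofList_eq_self_of_nodup _ (pvE_nodup faces k)]
    constructor
    · rintro ⟨⟨h0, hk'⟩, e, he, hey⟩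
      refine Or.inr ⟨e, he, ?_⟩
      rw [h e]
      simp only [List.mem_filter, PySem.List.mem_pyRange_one, PySem.Set.contains_iff]
      exact ⟨⟨h0, hk'⟩, hey⟩
    · rintro (h1 | ⟨e, he, hey⟩)
      · exact absurd h1 (List.not_mem_nil)
      · rw [h e] at hey
        simp only [List.mem_filter, PySem.List.mem_pyRange_one, PySem.Set.contains_iff] at hey
        exact ⟨hey.1, e, he, hey.2⟩
  · exact List.Pairwise.filter _ (PySem.List.pairwise_lt_pyRange_one 0 k)

theorem pvStep_eq (faces : List (List Int)) (adj : List (PySem.Set Int))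
    (ow : PySem.Dict (Int × Int) (List Int)) (k : Int) (h : pvOwInv faces ow k) (hk : 0 ≤ k) :
    (pvStepB faces (adj, ow) k).1 = pvStep faces adj k
      ∧ pvOwInv faces (pvStepB faces (adj, ow) k).2 (k + 1) := by
  unfold pvStepB
  obtain ⟨h1, h2⟩ := pvEdgeFold k (pvE faces k) (pvE_nodup faces k) ow ow PySem.Set.empty
    (fun _ _ => rfl)
  constructor
  · show (PySem.List.sorted _ (fun x => x)).foldl _ adj = _
    rw [h1, pvSortedNbrs faces ow k h]
    rfl
  · intro e'
    rw [h2 e', PySem.List.pyRange_one_succ_right hk, List.filter_append, h e']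
    by_cases hc : e' ∈ pvE faces k
    · rw [if_pos hc]; simp [hc]
    · rw [if_neg hc]; simp [hc]

theorem pvOuter (faces : List (List Int)) (m : Nat) :
    ((PySem.List.pyRange 0 (m : Int)).foldl (pvStepB faces)
        (faces.map (fun _ => PySem.Set.empty), PySem.Dict.empty)).1
      = (PySem.List.pyRange 0 (m : Int)).foldl (pvStep faces) (faces.map (fun _ => PySem.Set.empty))
      ∧ pvOwInv faces
          ((PySem.List.pyRange 0 (m : Int)).foldl (pvStepB faces)
            (faces.map (fun _ => PySem.Set.empty), PySem.Dict.empty)).2 (m : Int) := by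
  induction m with
  | zero =>
      rw [show ((0 : Nat) : Int) = 0 from rfl, PySem.List.pyRange_one_eq_nil le_rfl]
      constructor
      · rfl
      · intro e
        simp [PySem.List.pyRange_one_eq_nil le_rfl, PySem.Dict.getD_empty]
  | succ m ih =>
      have hcast : ((m + 1 : Nat) : Int) = (m : Int) + 1 := by push_cast; ring
      rw [hcast, PySem.List.pyRange_one_succ_right (by positivity), List.foldl_append,
        List.foldl_append]
      obtain ⟨h1, h2⟩ := ih
      simp only [List.foldl_cons, List.foldl_nil] at *
      rw [← Prod.mk.eta
        (p := (PySem.List.pyRange 0 (m:Int)).foldl (pvStepB faces)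
          (faces.map (fun _ => PySem.Set.empty), PySem.Dict.empty))]
      exact ⟨by rw [(pvStep_eq faces _ _ _ h2 (by positivity)).1, h1],
        (pvStep_eq faces _ _ _ h2 (by positivity)).2⟩

-- ===== VERDICT (by name: the statement is the Claim_ definition above) =====
theorem face_adjacency_spec : Claim_equal_face_adjacency := by
  intro faces _
  show face_adjacency faces = face_adjacency_alt faces
  rw [pvA_canon, pvB_canon, (pvOuter faces faces.length).1]
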